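-- pv_equiv track=rewrite | github.com/diplat-dev/BuildTools | WynnCrafter/crafter_engine.py | humanize_stat_key
-- ===== SOURCE A (Python) =====
-- DIRECT_STAT_LABELS = {
--     "str": "Strength",
--     "dex": "Dexterity",
--     "int": "Intelligence",
--     "def": "Defense",
--     "agi": "Agility",
--     "mr": "Mana Regen",
--     "ms": "Mana Steal",
--     "ls": "Life Steal",
--     "lb": "Loot Bonus",
--     "xpb": "XP Bonus",
--     "ref": "Reflection",
--     "thorns": "Thorns",
--     "expd": "Exploding",
--     "spd": "Walk Speed",
--     "atkTier": "Attack Speed Tier",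
--     "poison": "Poison",
--     "hpBonus": "Health Bonus",
--     "spRegen": "Soul Point Regen",
--     "eSteal": "Emerald Steal",
--     "hprPct": "Health Regen %",
--     "hprRaw": "Health Regen Raw",
--     "sdPct": "Spell Damage %",
--     "sdRaw": "Spell Damage Raw",
--     "mdPct": "Main Attack Damage %",
--     "mdRaw": "Main Attack Damage Raw",
--     "sprint": "Sprint",
--     "sprintReg": "Sprint Regen",
--     "jh": "Jump Height",
--     "lq": "Loot Quality",
--     "gXp": "Gather XP Bonus",
--     "gSpd": "Gather Speed",
--     "damPct": "Damage %",
--     "damRaw": "Damage Raw",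
--     "critDamPct": "Critical Damage %",
--     "healPct": "Heal %",
--     "kb": "Knockback",
--     "weakenEnemy": "Weaken Enemy",
--     "slowEnemy": "Slow Enemy",
--     "rDefPct": "Elemental Defense %",
--     "maxMana": "Max Mana",
--     "mainAttackRange": "Main Attack Range",
--     "durability": "Durability",
--     "duration": "Duration",
--     "charges": "Charges",
--     "slots": "Slots",
--     "hp": "Health",
-- }
--
-- def humanize_stat_key(key: str) -> str:
--     direct = DIRECT_STAT_LABELS.get(key)
--     if direct is not None:
--         return direct
--
--     if key.endswith("Req"):
--         return f"{humanize_stat_key(key[:-3])} Req"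
--
--     patterns = [
--         ("DamPct", "Damage %"),
--         ("DamRaw", "Damage Raw"),
--         ("DamAddMin", "Damage Add Min"),
--         ("DamAddMax", "Damage Add Max"),
--         ("MdPct", "Main Attack Damage %"),
--         ("MdRaw", "Main Attack Damage Raw"),
--         ("SdPct", "Spell Damage %"),
--         ("SdRaw", "Spell Damage Raw"),
--         ("DefPct", "Defense %"),
--         ("Def", "Defense"),
--     ]
--
--     element_prefixes = {
--         "n": "Neutral",
--         "e": "Earth",
--         "t": "Thunder",
--         "w": "Water",
--         "f": "Fire",
--         "a": "Air",
--         "r": "Rainbow",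
--     }
--
--     for prefix, element_name in element_prefixes.items():
--         if not key.startswith(prefix):
--             continue
--         remainder = key[len(prefix) :]
--         for suffix, label in patterns:
--             if remainder == suffix:
--                 return f"{element_name} {label}"
--
--     return key
-- ===== SOURCE B (Python) =====
-- DIRECT_STAT_LABELS = {
--     "str": "Strength",
--     "dex": "Dexterity",
--     "int": "Intelligence",
--     "def": "Defense",
--     "agi": "Agility",
--     "mr": "Mana Regen",
--     "ms": "Mana Steal",
--     "ls": "Life Steal",
--     "lb": "Loot Bonus",
--     "xpb": "XP Bonus",
--     "ref": "Reflection",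
--     "thorns": "Thorns",
--     "expd": "Exploding",
--     "spd": "Walk Speed",
--     "atkTier": "Attack Speed Tier",
--     "poison": "Poison",
--     "hpBonus": "Health Bonus",
--     "spRegen": "Soul Point Regen",
--     "eSteal": "Emerald Steal",
--     "hprPct": "Health Regen %",
--     "hprRaw": "Health Regen Raw",
--     "sdPct": "Spell Damage %",
--     "sdRaw": "Spell Damage Raw",
--     "mdPct": "Main Attack Damage %",
--     "mdRaw": "Main Attack Damage Raw",
--     "sprint": "Sprint",
--     "sprintReg": "Sprint Regen",
--     "jh": "Jump Height",
--     "lq": "Loot Quality",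
--     "gXp": "Gather XP Bonus",
--     "gSpd": "Gather Speed",
--     "damPct": "Damage %",
--     "damRaw": "Damage Raw",
--     "critDamPct": "Critical Damage %",
--     "healPct": "Heal %",
--     "kb": "Knockback",
--     "weakenEnemy": "Weaken Enemy",
--     "slowEnemy": "Slow Enemy",
--     "rDefPct": "Elemental Defense %",
--     "maxMana": "Max Mana",
--     "mainAttackRange": "Main Attack Range",
--     "durability": "Durability",
--     "duration": "Duration",
--     "charges": "Charges",
--     "slots": "Slots",
--     "hp": "Health",
-- }
--
--
-- # Precomputed flat table: every element-prefixed damage/defense key, built once.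
-- ELEMENT_DAMAGE = {
--     "nDamPct": "Neutral Damage %",
--     "nDamRaw": "Neutral Damage Raw",
--     "nDamAddMin": "Neutral Damage Add Min",
--     "nDamAddMax": "Neutral Damage Add Max",
--     "nMdPct": "Neutral Main Attack Damage %",
--     "nMdRaw": "Neutral Main Attack Damage Raw",
--     "nSdPct": "Neutral Spell Damage %",
--     "nSdRaw": "Neutral Spell Damage Raw",
--     "nDefPct": "Neutral Defense %",
--     "nDef": "Neutral Defense",
--     "eDamPct": "Earth Damage %",
--     "eDamRaw": "Earth Damage Raw",
--     "eDamAddMin": "Earth Damage Add Min",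
--     "eDamAddMax": "Earth Damage Add Max",
--     "eMdPct": "Earth Main Attack Damage %",
--     "eMdRaw": "Earth Main Attack Damage Raw",
--     "eSdPct": "Earth Spell Damage %",
--     "eSdRaw": "Earth Spell Damage Raw",
--     "eDefPct": "Earth Defense %",
--     "eDef": "Earth Defense",
--     "tDamPct": "Thunder Damage %",
--     "tDamRaw": "Thunder Damage Raw",
--     "tDamAddMin": "Thunder Damage Add Min",
--     "tDamAddMax": "Thunder Damage Add Max",
--     "tMdPct": "Thunder Main Attack Damage %",
--     "tMdRaw": "Thunder Main Attack Damage Raw",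
--     "tSdPct": "Thunder Spell Damage %",
--     "tSdRaw": "Thunder Spell Damage Raw",
--     "tDefPct": "Thunder Defense %",
--     "tDef": "Thunder Defense",
--     "wDamPct": "Water Damage %",
--     "wDamRaw": "Water Damage Raw",
--     "wDamAddMin": "Water Damage Add Min",
--     "wDamAddMax": "Water Damage Add Max",
--     "wMdPct": "Water Main Attack Damage %",
--     "wMdRaw": "Water Main Attack Damage Raw",
--     "wSdPct": "Water Spell Damage %",
--     "wSdRaw": "Water Spell Damage Raw",
--     "wDefPct": "Water Defense %",
--     "wDef": "Water Defense",
--     "fDamPct": "Fire Damage %",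
--     "fDamRaw": "Fire Damage Raw",
--     "fDamAddMin": "Fire Damage Add Min",
--     "fDamAddMax": "Fire Damage Add Max",
--     "fMdPct": "Fire Main Attack Damage %",
--     "fMdRaw": "Fire Main Attack Damage Raw",
--     "fSdPct": "Fire Spell Damage %",
--     "fSdRaw": "Fire Spell Damage Raw",
--     "fDefPct": "Fire Defense %",
--     "fDef": "Fire Defense",
--     "aDamPct": "Air Damage %",
--     "aDamRaw": "Air Damage Raw",
--     "aDamAddMin": "Air Damage Add Min",
--     "aDamAddMax": "Air Damage Add Max",
--     "aMdPct": "Air Main Attack Damage %",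
--     "aMdRaw": "Air Main Attack Damage Raw",
--     "aSdPct": "Air Spell Damage %",
--     "aSdRaw": "Air Spell Damage Raw",
--     "aDefPct": "Air Defense %",
--     "aDef": "Air Defense",
--     "rDamPct": "Rainbow Damage %",
--     "rDamRaw": "Rainbow Damage Raw",
--     "rDamAddMin": "Rainbow Damage Add Min",
--     "rDamAddMax": "Rainbow Damage Add Max",
--     "rMdPct": "Rainbow Main Attack Damage %",
--     "rMdRaw": "Rainbow Main Attack Damage Raw",
--     "rSdPct": "Rainbow Spell Damage %",
--     "rSdRaw": "Rainbow Spell Damage Raw",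
--     "rDefPct": "Rainbow Defense %",
--     "rDef": "Rainbow Defense",
-- }
--
--
-- def humanize_stat_key(key: str) -> str:
--     # iteratively strip trailing "Req" layers instead of recursing
--     reqs = 0
--     k = key
--     while k not in DIRECT_STAT_LABELS and k.endswith("Req"):
--         k = k[:-3]
--         reqs += 1
--     base = DIRECT_STAT_LABELS.get(k)
--     if base is None:
--         base = ELEMENT_DAMAGE.get(k, k)
--     return base + " Req" * reqs
-- ===== Notes on version B (the rewrite author's own statement) =====
-- stated objective: alternative
-- what changed: Replaced A's recursion on the Req suffix and its nested prefix/pattern scan by an iterative loop that strips and counts trailing Req layers, a single lookup of the base key in a precomputed flat 70-entry elemental table, and string repetition of ' Req'.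
import Mathlib
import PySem

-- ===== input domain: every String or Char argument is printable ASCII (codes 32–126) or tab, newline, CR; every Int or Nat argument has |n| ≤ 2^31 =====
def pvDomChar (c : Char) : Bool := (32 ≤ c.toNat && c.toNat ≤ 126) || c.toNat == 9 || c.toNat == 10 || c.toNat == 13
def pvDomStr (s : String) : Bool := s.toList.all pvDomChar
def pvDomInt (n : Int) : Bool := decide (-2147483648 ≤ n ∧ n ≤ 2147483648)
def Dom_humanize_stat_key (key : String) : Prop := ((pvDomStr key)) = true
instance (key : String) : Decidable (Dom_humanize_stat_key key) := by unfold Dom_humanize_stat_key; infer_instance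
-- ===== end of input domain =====

-- B strips and counts trailing "Req" layers iteratively, resolves the base key via a precomputed flat
-- 70-entry elemental table, and appends " Req" repeated — instead of A's recursion and nested scans.

-- shared module constant (both Python files carry the same literal)
set_option maxRecDepth 4096 in
def pvDirect : PySem.Dict (List Char) (List Char) := PySem.Dict.ofList [
  ("str".toList, "Strength".toList),
  ("dex".toList, "Dexterity".toList),
  ("int".toList, "Intelligence".toList),
  ("def".toList, "Defense".toList),
  ("agi".toList, "Agility".toList),
  ("mr".toList, "Mana Regen".toList),
  ("ms".toList, "Mana Steal".toList),
  ("ls".toList, "Life Steal".toList),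
  ("lb".toList, "Loot Bonus".toList),
  ("xpb".toList, "XP Bonus".toList),
  ("ref".toList, "Reflection".toList),
  ("thorns".toList, "Thorns".toList),
  ("expd".toList, "Exploding".toList),
  ("spd".toList, "Walk Speed".toList),
  ("atkTier".toList, "Attack Speed Tier".toList),
  ("poison".toList, "Poison".toList),
  ("hpBonus".toList, "Health Bonus".toList),
  ("spRegen".toList, "Soul Point Regen".toList),
  ("eSteal".toList, "Emerald Steal".toList),
  ("hprPct".toList, "Health Regen %".toList),
  ("hprRaw".toList, "Health Regen Raw".toList),
  ("sdPct".toList, "Spell Damage %".toList),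
  ("sdRaw".toList, "Spell Damage Raw".toList),
  ("mdPct".toList, "Main Attack Damage %".toList),
  ("mdRaw".toList, "Main Attack Damage Raw".toList),
  ("sprint".toList, "Sprint".toList),
  ("sprintReg".toList, "Sprint Regen".toList),
  ("jh".toList, "Jump Height".toList),
  ("lq".toList, "Loot Quality".toList),
  ("gXp".toList, "Gather XP Bonus".toList),
  ("gSpd".toList, "Gather Speed".toList),
  ("damPct".toList, "Damage %".toList),
  ("damRaw".toList, "Damage Raw".toList),
  ("critDamPct".toList, "Critical Damage %".toList),
  ("healPct".toList, "Heal %".toList),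
  ("kb".toList, "Knockback".toList),
  ("weakenEnemy".toList, "Weaken Enemy".toList),
  ("slowEnemy".toList, "Slow Enemy".toList),
  ("rDefPct".toList, "Elemental Defense %".toList),
  ("maxMana".toList, "Max Mana".toList),
  ("mainAttackRange".toList, "Main Attack Range".toList),
  ("durability".toList, "Durability".toList),
  ("duration".toList, "Duration".toList),
  ("charges".toList, "Charges".toList),
  ("slots".toList, "Slots".toList),
  ("hp".toList, "Health".toList)]

-- ===== PORT A =====
-- A's local 'patterns' list
def pvPatterns : List (List Char × List Char) := [
  ("DamPct".toList, "Damage %".toList),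
  ("DamRaw".toList, "Damage Raw".toList),
  ("DamAddMin".toList, "Damage Add Min".toList),
  ("DamAddMax".toList, "Damage Add Max".toList),
  ("MdPct".toList, "Main Attack Damage %".toList),
  ("MdRaw".toList, "Main Attack Damage Raw".toList),
  ("SdPct".toList, "Spell Damage %".toList),
  ("SdRaw".toList, "Spell Damage Raw".toList),
  ("DefPct".toList, "Defense %".toList),
  ("Def".toList, "Defense".toList)]

-- A's local 'element_prefixes' dict is only iterated over; ported as its items list
def pvPrefixes : List (List Char × List Char) := [
  ("n".toList, "Neutral".toList),
  ("e".toList, "Earth".toList),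
  ("t".toList, "Thunder".toList),
  ("w".toList, "Water".toList),
  ("f".toList, "Fire".toList),
  ("a".toList, "Air".toList),
  ("r".toList, "Rainbow".toList)]

-- inner 'for suffix, label in patterns' loop with early return
def pvAInner (name : List Char) (remainder : List Char) : List (List Char × List Char) → Option (List Char)
  | [] => none
  | (suffix, label) :: rest =>
    if remainder = suffix then some (name ++ " ".toList ++ label)
    else pvAInner name remainder rest

-- outer 'for prefix, element_name in element_prefixes.items()' loop
def pvAOuter (key : List Char) : List (List Char × List Char) → List Char
  | [] => key
  | (pfx, name) :: rest =>
    if !(PySem.Chars.startswith key pfx) then pvAOuter key rest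
    else
      match pvAInner name (PySem.List.slice key (some (pfx.length : Int)) none) pvPatterns with
      | some r => r
      | none => pvAOuter key rest

set_option maxRecDepth 4096 in
def pvHumA (key : List Char) : List Char :=
  match pvDirect.get? key with
  | some direct => direct
  | none =>
    if h : PySem.Chars.endswith key "Req".toList then
      pvHumA (PySem.List.slice key none (some (-3))) ++ " Req".toList
    else
      pvAOuter key pvPrefixes
termination_by key.length
decreasing_by
  rw [PySem.List.slice_to_neg_ofNat key 3 (by omega)]
  have hs : "Req".toList <:+ key := (PySem.Chars.endswith_iff key _).mp h
  have := hs.length_le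
  simp only [List.length_take]
  simp at this
  omega

def humanize_stat_key (key : String) : String := String.ofList (pvHumA key.toList)

-- ===== PORT B =====
-- B's precomputed flat table: every element-prefixed damage/defense key, one literal dict
set_option maxRecDepth 8192 in
def pvElementDamageB : PySem.Dict (List Char) (List Char) := PySem.Dict.ofList [
  ("nDamPct".toList, "Neutral Damage %".toList),
  ("nDamRaw".toList, "Neutral Damage Raw".toList),
  ("nDamAddMin".toList, "Neutral Damage Add Min".toList),
  ("nDamAddMax".toList, "Neutral Damage Add Max".toList),
  ("nMdPct".toList, "Neutral Main Attack Damage %".toList),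
  ("nMdRaw".toList, "Neutral Main Attack Damage Raw".toList),
  ("nSdPct".toList, "Neutral Spell Damage %".toList),
  ("nSdRaw".toList, "Neutral Spell Damage Raw".toList),
  ("nDefPct".toList, "Neutral Defense %".toList),
  ("nDef".toList, "Neutral Defense".toList),
  ("eDamPct".toList, "Earth Damage %".toList),
  ("eDamRaw".toList, "Earth Damage Raw".toList),
  ("eDamAddMin".toList, "Earth Damage Add Min".toList),
  ("eDamAddMax".toList, "Earth Damage Add Max".toList),
  ("eMdPct".toList, "Earth Main Attack Damage %".toList),
  ("eMdRaw".toList, "Earth Main Attack Damage Raw".toList),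
  ("eSdPct".toList, "Earth Spell Damage %".toList),
  ("eSdRaw".toList, "Earth Spell Damage Raw".toList),
  ("eDefPct".toList, "Earth Defense %".toList),
  ("eDef".toList, "Earth Defense".toList),
  ("tDamPct".toList, "Thunder Damage %".toList),
  ("tDamRaw".toList, "Thunder Damage Raw".toList),
  ("tDamAddMin".toList, "Thunder Damage Add Min".toList),
  ("tDamAddMax".toList, "Thunder Damage Add Max".toList),
  ("tMdPct".toList, "Thunder Main Attack Damage %".toList),
  ("tMdRaw".toList, "Thunder Main Attack Damage Raw".toList),
  ("tSdPct".toList, "Thunder Spell Damage %".toList),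
  ("tSdRaw".toList, "Thunder Spell Damage Raw".toList),
  ("tDefPct".toList, "Thunder Defense %".toList),
  ("tDef".toList, "Thunder Defense".toList),
  ("wDamPct".toList, "Water Damage %".toList),
  ("wDamRaw".toList, "Water Damage Raw".toList),
  ("wDamAddMin".toList, "Water Damage Add Min".toList),
  ("wDamAddMax".toList, "Water Damage Add Max".toList),
  ("wMdPct".toList, "Water Main Attack Damage %".toList),
  ("wMdRaw".toList, "Water Main Attack Damage Raw".toList),
  ("wSdPct".toList, "Water Spell Damage %".toList),
  ("wSdRaw".toList, "Water Spell Damage Raw".toList),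
  ("wDefPct".toList, "Water Defense %".toList),
  ("wDef".toList, "Water Defense".toList),
  ("fDamPct".toList, "Fire Damage %".toList),
  ("fDamRaw".toList, "Fire Damage Raw".toList),
  ("fDamAddMin".toList, "Fire Damage Add Min".toList),
  ("fDamAddMax".toList, "Fire Damage Add Max".toList),
  ("fMdPct".toList, "Fire Main Attack Damage %".toList),
  ("fMdRaw".toList, "Fire Main Attack Damage Raw".toList),
  ("fSdPct".toList, "Fire Spell Damage %".toList),
  ("fSdRaw".toList, "Fire Spell Damage Raw".toList),
  ("fDefPct".toList, "Fire Defense %".toList),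
  ("fDef".toList, "Fire Defense".toList),
  ("aDamPct".toList, "Air Damage %".toList),
  ("aDamRaw".toList, "Air Damage Raw".toList),
  ("aDamAddMin".toList, "Air Damage Add Min".toList),
  ("aDamAddMax".toList, "Air Damage Add Max".toList),
  ("aMdPct".toList, "Air Main Attack Damage %".toList),
  ("aMdRaw".toList, "Air Main Attack Damage Raw".toList),
  ("aSdPct".toList, "Air Spell Damage %".toList),
  ("aSdRaw".toList, "Air Spell Damage Raw".toList),
  ("aDefPct".toList, "Air Defense %".toList),
  ("aDef".toList, "Air Defense".toList),
  ("rDamPct".toList, "Rainbow Damage %".toList),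
  ("rDamRaw".toList, "Rainbow Damage Raw".toList),
  ("rDamAddMin".toList, "Rainbow Damage Add Min".toList),
  ("rDamAddMax".toList, "Rainbow Damage Add Max".toList),
  ("rMdPct".toList, "Rainbow Main Attack Damage %".toList),
  ("rMdRaw".toList, "Rainbow Main Attack Damage Raw".toList),
  ("rSdPct".toList, "Rainbow Spell Damage %".toList),
  ("rSdRaw".toList, "Rainbow Spell Damage Raw".toList),
  ("rDefPct".toList, "Rainbow Defense %".toList),
  ("rDef".toList, "Rainbow Defense".toList)]

-- the 'while k not in DIRECT_STAT_LABELS and k.endswith("Req")' loop: strips one layer per step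
set_option maxRecDepth 4096 in
def pvStrip (k : List Char) (reqs : Nat) : List Char × Nat :=
  if h : pvDirect.get? k = none ∧ PySem.Chars.endswith k "Req".toList then
    pvStrip (PySem.List.slice k none (some (-3))) (reqs + 1)
  else (k, reqs)
termination_by k.length
decreasing_by
  rw [PySem.List.slice_to_neg_ofNat k 3 (by omega)]
  have hs : "Req".toList <:+ k := (PySem.Chars.endswith_iff k _).mp h.2
  have := hs.length_le
  simp only [List.length_take]
  simp at this
  omega

def pvHumB (key : List Char) : List Char :=
  let p := pvStrip key 0
  let base : List Char :=
    match pvDirect.get? p.1 with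
    | some d => d
    | none => pvElementDamageB.getD p.1 p.1
  base ++ (List.replicate p.2 " Req".toList).flatten

def humanize_stat_key_alt (key : String) : String := String.ofList (pvHumB key.toList)

-- ===== PRECONDITION & SPEC =====
def Spec_humanize_stat_key (key : String) (out : String) : Prop := out = humanize_stat_key_alt key
instance (key : String) (out : String) : Decidable (Spec_humanize_stat_key key out) := by unfold Spec_humanize_stat_key; infer_instance

-- ===== CLAIM (what is proved, stated in full; the proofs are below) =====
def Claim_equal_humanize_stat_key : Prop := ∀ (key : String), Dom_humanize_stat_key key → Spec_humanize_stat_key key (humanize_stat_key key)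

-- ===== LEMMAS AND PROOFS =====

def pvFlatList : List (List Char × List Char) :=
  pvPrefixes.flatMap (fun p => pvPatterns.map (fun q => (p.1 ++ q.1, p.2 ++ " ".toList ++ q.2)))

theorem pvGet_mk_find (l : List (List Char × List Char)) (k : List Char) :
    (PySem.Dict.mk l).get? k = (l.find? (fun q => q.1 == k)).map (·.2) := by
  induction l with
  | nil => rfl
  | cons h t ih =>
    obtain ⟨a, b⟩ := h
    rw [PySem.Dict.get?_mk_cons]
    by_cases hk : a = k <;> simp [hk, ih]

set_option maxRecDepth 8192 in
theorem pvElementDamageB_eq_mk : pvElementDamageB = PySem.Dict.mk pvFlatList := by decide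

theorem pvInner_find (name key p : List Char) (hp : p <+: key)
    (pats : List (List Char × List Char)) :
    pvAInner name (PySem.List.slice key (some (p.length : Int)) none) pats
      = ((pats.map (fun q => (p ++ q.1, name ++ " ".toList ++ q.2))).find?
          (fun q => q.1 == key)).map (·.2) := by
  obtain ⟨t, rfl⟩ := hp
  rw [PySem.List.slice_from_natCast, List.drop_left]
  induction pats with
  | nil => rfl
  | cons hd rest ih =>
    obtain ⟨s, l⟩ := hd
    simp only [List.map_cons, List.find?_cons]
    by_cases hts : t = s
    · subst hts
      simp [pvAInner]
    · have hbe : (p ++ s == p ++ t) = false := by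
        simp only [beq_eq_false_iff_ne, ne_eq]
        exact fun he => hts (List.append_cancel_left he).symm
      rw [hbe]
      simp only [pvAInner, if_neg hts]
      exact ih

theorem pvOuter_find (key : List Char) (pres : List (List Char × List Char)) :
    pvAOuter key pres
      = (((pres.flatMap (fun p => pvPatterns.map (fun q => (p.1 ++ q.1, p.2 ++ " ".toList ++ q.2)))).find?
          (fun q => q.1 == key)).map (·.2)).getD key := by
  induction pres with
  | nil => simp [pvAOuter]
  | cons hd rest ih =>
    obtain ⟨p, name⟩ := hd
    rw [List.flatMap_cons, List.find?_append]
    by_cases hsw : PySem.Chars.startswith key p = true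
    · have hp : p <+: key := (PySem.Chars.startswith_iff key p).mp hsw
      simp only [pvAOuter, hsw, Bool.not_true, Bool.false_eq_true, if_false]
      rw [pvInner_find name key p hp pvPatterns]
      cases hfind : (pvPatterns.map (fun q => (p ++ q.1, name ++ " ".toList ++ q.2))).find?
          (fun q => q.1 == key) with
      | none => simpa using ih
      | some r => simp
    · have hp : ¬ p <+: key := fun hx => hsw ((PySem.Chars.startswith_iff key p).mpr hx)
      have hnone : (pvPatterns.map (fun q => (p ++ q.1, name ++ " ".toList ++ q.2))).find?
          (fun q => q.1 == key) = none := by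
        rw [List.find?_eq_none]
        intro x hx
        simp only [List.mem_map] at hx
        obtain ⟨q, _, rfl⟩ := hx
        simp only [beq_iff_eq]
        exact fun he => hp ⟨q.1, he⟩
      rw [Bool.not_eq_true] at hsw
      rw [hnone]
      simp only [pvAOuter, hsw, Bool.not_false, if_true]
      simpa using ih

-- B's base resolution applied after the strip loop
def pvBase (k : List Char) : List Char :=
  match pvDirect.get? k with
  | some d => d
  | none => pvElementDamageB.getD k k

set_option maxRecDepth 8192 in
theorem pvStrip_invariant (n : ℕ) : ∀ (k : List Char) (r : ℕ), k.length = n →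
    pvBase (pvStrip k r).1 ++ (List.replicate (pvStrip k r).2 " Req".toList).flatten
      = pvHumA k ++ (List.replicate r " Req".toList).flatten := by
  induction n using Nat.strong_induction_on with
  | _ n ih =>
    intro k r hn
    by_cases hd : pvDirect.get? k = none
    · by_cases he : PySem.Chars.endswith k "Req".toList = true
      · have h1 : pvStrip k r = pvStrip (PySem.List.slice k none (some (-3))) (r + 1) := by
          rw [pvStrip, dif_pos ⟨hd, he⟩]
        have h2 : pvHumA k
            = pvHumA (PySem.List.slice k none (some (-3))) ++ " Req".toList := by
          rw [pvHumA, hd]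
          simp only [dif_pos he]
        have hs : "Req".toList <:+ k := (PySem.Chars.endswith_iff k _).mp he
        have h3 := hs.length_le
        simp at h3
        subst hn
        have hlt : (PySem.List.slice k none (some (-3))).length < k.length := by
          rw [PySem.List.slice_to_neg_ofNat k 3 (by omega)]
          simp only [List.length_take]
          omega
        rw [h1, h2, ih _ hlt _ (r + 1) rfl]
        simp [List.replicate_succ, List.append_assoc]
      · have h1 : pvStrip k r = (k, r) := by
          rw [pvStrip, dif_neg (fun hc => he hc.2)]
        have h2 : pvHumA k = pvAOuter k pvPrefixes := by
          rw [pvHumA, hd]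
          simp only [dif_neg he]
        have hb : pvBase k = pvElementDamageB.getD k k := by
          unfold pvBase
          rw [hd]
        rw [h1, h2, hb]
        rw [pvOuter_find, PySem.Dict.getD_eq_get?_getD, pvElementDamageB_eq_mk, pvGet_mk_find]
        simp only [pvFlatList]
    · obtain ⟨d, hd'⟩ := Option.ne_none_iff_exists'.mp hd
      have h1 : pvStrip k r = (k, r) := by
        rw [pvStrip, dif_neg (fun hc => hd hc.1)]
      have h2 : pvHumA k = d := by
        rw [pvHumA, hd']
      have hb : pvBase k = d := by
        unfold pvBase
        rw [hd']
      rw [h1, h2, hb]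

set_option maxRecDepth 8192 in
theorem pvHum_eq (key : List Char) : pvHumA key = pvHumB key := by
  have h := pvStrip_invariant key.length key 0 rfl
  simp only [List.replicate_zero, List.flatten_nil, List.append_nil] at h
  rw [pvHumB]
  exact h.symm

-- ===== VERDICT (by name: the statement is the Claim_ definition above) =====
theorem humanize_stat_key_spec : Claim_equal_humanize_stat_key := by
  intro key _
  unfold Spec_humanize_stat_key humanize_stat_key humanize_stat_key_alt
  rw [pvHum_eq]
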